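-- pv_equiv track=rewrite | github.com/stefantaubert/lifeclef-geo-2018 | src/GroupFinder.py | get_group_lengths
-- ===== SOURCE A (Python) =====
-- def get_group_lengths(groups):
--     group_counts = {}
--
--     for group in groups:
--         current_len = len(group)
--         if current_len in group_counts.keys():
--             group_counts[current_len] += 1
--         else:
--             group_counts[current_len] = 1
--
--     return group_counts
-- ===== SOURCE B (Python) =====
-- def get_group_lengths(groups):
--     # Alternative algorithm: partition worklist. Repeatedly take the first remaining
--     # length, determine its multiplicity by filtering out ALL of its occurrences, and
--     # continue on the shrunken remainder; keys appear in first-occurrence order.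
--     lengths = [len(g) for g in groups]
--     out = {}
--     while lengths:
--         v = lengths[0]
--         rest = [x for x in lengths[1:] if x != v]
--         out[v] = len(lengths) - len(rest)
--         lengths = rest
--     return out
-- ===== Notes on version B (the rewrite author's own statement) =====
-- stated objective: alternative
-- what changed: Replaces A's single accumulating pass (per-element membership test and increment into a dict) with a partition worklist: repeatedly take the first remaining length, obtain its count by filtering out all of its occurrences, and loop on the shrunken remainder, so each key is produced exactly once and no per-element counter update exists.
import Mathlib
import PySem

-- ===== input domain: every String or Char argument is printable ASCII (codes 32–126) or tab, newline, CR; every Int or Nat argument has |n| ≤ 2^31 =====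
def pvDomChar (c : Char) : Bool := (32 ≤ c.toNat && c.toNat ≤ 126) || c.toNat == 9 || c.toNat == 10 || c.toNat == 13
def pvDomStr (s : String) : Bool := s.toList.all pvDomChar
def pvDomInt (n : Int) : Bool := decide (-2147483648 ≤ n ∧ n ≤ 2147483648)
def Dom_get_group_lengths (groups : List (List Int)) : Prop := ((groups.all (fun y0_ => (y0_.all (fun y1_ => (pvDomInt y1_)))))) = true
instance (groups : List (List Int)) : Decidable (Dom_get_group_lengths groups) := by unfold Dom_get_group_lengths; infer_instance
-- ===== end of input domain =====

-- B replaces A's single accumulating dict pass with a partition worklist (take the first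
-- remaining length, filter out all its occurrences to count it, loop on the remainder);
-- an alternative algorithm, not faster.

-- ===== PORT A =====
-- for group in groups: if len(group) in d.keys(): d[l] += 1 else d[l] = 1; return d
def get_group_lengths (groups : List (List Int)) : List (Int × Int) :=
  (groups.foldl
    (fun d group =>
      let current_len : Int := (group.length : Int)
      if d.contains current_len then
        d.insert current_len (d.getD current_len 0 + 1)
      else
        d.insert current_len 1)
    (PySem.Dict.empty : PySem.Dict Int Int)).items

-- ===== PORT B =====
-- while lengths: v = lengths[0]; rest = [x for x in lengths[1:] if x != v];
--                out[v] = len(lengths) - len(rest); lengths = rest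
def pvAltLoop : List Int → PySem.Dict Int Int → PySem.Dict Int Int
  | [], out => out
  | v :: tl, out =>
      let rest := tl.filter (fun x => x != v)
      pvAltLoop rest (out.insert v ((v :: tl).length - rest.length : Int))
termination_by ls _ => ls.length
decreasing_by
  simp only [List.length_cons, List.length_unattach]
  exact Nat.lt_succ_of_le (le_trans (List.length_filter_le _ _) (by simp))

def get_group_lengths_alt (groups : List (List Int)) : List (Int × Int) :=
  let lengths : List Int := groups.map (fun group => (group.length : Int))
  (pvAltLoop lengths (PySem.Dict.empty : PySem.Dict Int Int)).items

-- ===== PRECONDITION & SPEC =====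
def Spec_get_group_lengths (groups : List (List Int)) (out : List (Int × Int)) : Prop := out = get_group_lengths_alt groups
instance (groups : List (List Int)) (out : List (Int × Int)) : Decidable (Spec_get_group_lengths groups out) := by unfold Spec_get_group_lengths; infer_instance

-- ===== CLAIM =====
def Claim_equal_get_group_lengths : Prop := ∀ (groups : List (List Int)), Dom_get_group_lengths groups → Spec_get_group_lengths groups (get_group_lengths groups)

-- ===== LEMMAS AND PROOFS =====

-- A's branchy body equals the unconditional counter step.
theorem pv_step_eq (d : PySem.Dict Int Int) (x : Int) :
    (if d.contains x then d.insert x (d.getD x 0 + 1) else d.insert x 1)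
      = d.insert x (d.getD x 0 + 1) := by
  by_cases h : d.contains x = true
  · simp [h]
  · have hf : d.contains x = false := by simpa using h
    rw [if_neg h, PySem.Dict.getD_of_not_contains d 0 hf]
    norm_num

theorem pv_fold_eq (groups : List (List Int)) :
    get_group_lengths groups
      = (PySem.Dict.counter (groups.map (fun g => (g.length : Int)))).items := by
  unfold get_group_lengths
  rw [← PySem.Dict.foldl_insert_getD_add_one_eq_counter, List.foldl_map]
  congr 1
  apply List.foldl_ext
  intro d g _
  simpa using pv_step_eq d (g.length : Int)

-- Set.add past a distinct head commutes with cons.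
theorem pv_add_cons (a x : Int) (s : List Int) (h : x ≠ a) :
    PySem.Set.add (a :: s) x = a :: PySem.Set.add s x := by
  rw [PySem.Set.add_eq_ite, PySem.Set.add_eq_ite]
  by_cases hm : x ∈ s
  · simp [hm]
  · have : x ∉ a :: s := by simp [h, hm]
    simp [this, hm]

theorem pv_foldl_add_cons (t : List Int) (a : Int) :
    ∀ s : List Int, (∀ y ∈ t, y ≠ a) →
      t.foldl PySem.Set.add (a :: s) = a :: t.foldl PySem.Set.add s := by
  induction t with
  | nil => intro s _; rfl
  | cons x t ih =>
      intro s h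
      simp only [List.foldl_cons]
      rw [pv_add_cons a x s (h x (by simp))]
      exact ih _ (fun y hy => h y (by simp [hy]))

theorem pv_foldl_add_filter (t : List Int) (v : Int) :
    ∀ s : List Int, v ∈ s →
      t.foldl PySem.Set.add s = (t.filter (fun x => x != v)).foldl PySem.Set.add s := by
  induction t with
  | nil => intro s _; rfl
  | cons x t ih =>
      intro s hv
      by_cases hx : x = v
      · subst hx
        simp only [List.foldl_cons, List.filter_cons, bne_self_eq_false]
        rw [PySem.Set.add_of_mem hv]
        exact ih s hv
      · have hb : (x != v) = true := by simpa using hx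
        simp only [List.foldl_cons, List.filter_cons, hb, if_pos]
        exact ih (PySem.Set.add s x) (by rw [PySem.Set.mem_add]; exact Or.inl hv)

-- First-occurrence dedup of v :: t = v :: dedup of t with all v's removed.
theorem pv_ofList_cons (v : Int) (t : List Int) :
    PySem.Set.ofList (v :: t) = v :: PySem.Set.ofList (t.filter (fun x => x != v)) := by
  rw [PySem.Set.ofList_eq_foldl, PySem.Set.ofList_eq_foldl]
  simp only [List.foldl_cons]
  have h0 : PySem.Set.add ([] : List Int) v = [v] := rfl
  rw [h0, pv_foldl_add_filter t v [v] (by simp)]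
  exact pv_foldl_add_cons _ v []
    (fun y hy => by
      have := List.of_mem_filter hy
      simpa using this)

theorem pv_len_filter (v : Int) (u : List Int) :
    (u.filter (fun x => x != v)).length + u.count v = u.length := by
  induction u with
  | nil => rfl
  | cons x u ih =>
      by_cases hx : x = v
      · subst hx
        rw [List.filter_cons_of_neg (by simp), List.count_cons_self, List.length_cons]
        omega
      · rw [List.filter_cons_of_pos (by simpa using hx),
            List.count_cons_of_ne hx, List.length_cons, List.length_cons]
        omega

-- Main invariant of B's worklist loop.
theorem pv_loop_items (n : Nat) : ∀ (l : List Int) (d : PySem.Dict Int Int),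
    l.length = n → (∀ x ∈ l, d.contains x = false) →
    (pvAltLoop l d).items
      = d.items ++ (PySem.Set.ofList l).map (fun k => (k, (l.count k : Int))) := by
  induction n using Nat.strong_induction_on with
  | _ n ih =>
    intro l d hn hfresh
    match l with
    | [] => simp [pvAltLoop, PySem.Set.ofList]
    | v :: t =>
      rw [pvAltLoop]
      set r := t.filter (fun x => x != v) with hr
      have hrlen : r.length + t.count v = t.length := by
        rw [hr]; exact pv_len_filter v t
      have hcv : ((v :: t).length : Int) - (r.length : Int) = ((v :: t).count v : Int) := by
        simp only [List.length_cons, List.count_cons_self]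
        push_cast
        omega
      have hmemr : ∀ x ∈ r, x ≠ v := fun x hx => by
        have := List.of_mem_filter hx; simpa using this
      have hfresh' : ∀ x ∈ r, (d.insert v (((v :: t).length : Int) - r.length)).contains x = false := by
        intro x hx
        have hxt : x ∈ t := List.mem_of_mem_filter hx
        rw [PySem.Dict.contains_insert]
        simp only [Bool.or_eq_false_iff]
        exact ⟨by simpa using hmemr x hx, hfresh x (by simp [hxt])⟩
      have hlt : r.length < n := by
        rw [← hn]; simp only [List.length_cons]
        exact Nat.lt_succ_of_le (List.length_filter_le _ _)
      rw [ih r.length hlt r _ rfl hfresh']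
      rw [PySem.Dict.items_insert_of_not_contains _ _ (hfresh v (by simp))]
      rw [pv_ofList_cons]
      simp only [List.map_cons, List.append_assoc, List.singleton_append]
      congr 2
      · exact congrArg _ hcv
      · apply List.map_congr_left
        intro k hk
        have hkr : k ∈ r := by rwa [PySem.Set.mem_ofList] at hk
        have hkv : k ≠ v := hmemr k hkr
        have h1 : (v :: t).count k = t.count k := List.count_cons_of_ne (Ne.symm hkv)
        have h2 : r.count k = t.count k := by
          rw [hr]
          exact List.count_filter (by simpa using hkv)
        rw [h1, ← h2]

-- ===== VERDICT =====
theorem get_group_lengths_spec : Claim_equal_get_group_lengths := by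
  intro groups _
  unfold Spec_get_group_lengths get_group_lengths_alt
  rw [pv_fold_eq, PySem.Dict.items_counter]
  rw [pv_loop_items (groups.map (fun g => (g.length : Int))).length _ _ rfl
    (fun x _ => PySem.Dict.contains_empty x)]
  rfl
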